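-- pv_equiv track=rewrite | github.com/isilionisilme/veterinary-medical-records-handoff | backend/tests/unit/test_requirements_pinning_guard.py | _is_include_directive
-- ===== SOURCE A (Python) =====
-- ALLOWED_INCLUDE_PREFIXES = ("-r", "--requirement", "-c", "--constraint")
--
-- def _is_include_directive(line: str) -> bool:
--     lowered = line.lower()
--     for prefix in ALLOWED_INCLUDE_PREFIXES:
--         if (
--             lowered == prefix
--             or lowered.startswith(prefix + " ")
--             or lowered.startswith(prefix + "=")
--         ):
--             return True
--     return False
-- ===== SOURCE B (Python) =====
-- ALLOWED_INCLUDE_DIRECTIVES = ("-r", "--requirement", "-c", "--constraint")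
--
--
-- def _head(s: str) -> str:
--     # portion of s before the first space or '=' (the whole string if none)
--     for i, ch in enumerate(s):
--         if ch == " " or ch == "=":
--             return s[:i]
--     return s
--
--
-- def _is_include_directive(line: str) -> bool:
--     return _head(line.lower()) in ALLOWED_INCLUDE_DIRECTIVES
-- ===== Notes on version B (the rewrite author's own statement) =====
-- stated objective: idiomatic
-- what changed: Instead of looping over the four prefixes testing equality and two startswith variants each, B extracts the leading token (the part of the lowercased line before the first space or '=') in one scan and does a single membership test.
import Mathlib
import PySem

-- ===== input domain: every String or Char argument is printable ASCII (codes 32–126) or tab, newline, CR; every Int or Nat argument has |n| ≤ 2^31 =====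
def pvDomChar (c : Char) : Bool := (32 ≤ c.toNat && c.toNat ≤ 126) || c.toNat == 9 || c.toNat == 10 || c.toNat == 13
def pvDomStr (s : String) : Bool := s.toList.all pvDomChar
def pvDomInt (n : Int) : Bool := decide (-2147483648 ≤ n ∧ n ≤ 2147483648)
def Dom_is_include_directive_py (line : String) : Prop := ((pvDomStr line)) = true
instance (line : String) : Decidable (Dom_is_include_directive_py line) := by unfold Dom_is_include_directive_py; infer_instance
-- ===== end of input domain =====

-- B replaces A's loop of per-prefix equality/startswith tests by one leading-token extraction plus a membership test (idiomatic decomposition; same behaviour).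


-- ===== PORT A =====
-- ALLOWED_INCLUDE_PREFIXES
def allowedIncludePrefixes : List String := ["-r", "--requirement", "-c", "--constraint"]

def is_include_directive_py (line : String) : Bool :=
  let lowered := PySem.Str.lower line
  allowedIncludePrefixes.any (fun prefix_ =>
    lowered == prefix_
      || PySem.Str.startswith lowered (prefix_ ++ " ")
      || PySem.Str.startswith lowered (prefix_ ++ "="))

-- ===== PORT B =====
-- _head: portion of s before the first space or '=' (the whole string if none)
def pvHead : List Char → List Char
  | [] => []
  | c :: cs => if c = ' ' || c = '=' then [] else c :: pvHead cs

def is_include_directive_py_alt (line : String) : Bool :=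
  let lowered := PySem.Str.lower line
  allowedIncludePrefixes.contains (String.ofList (pvHead lowered.toList))

-- ===== PRECONDITION & SPEC =====
def Spec_is_include_directive_py (line : String) (out : Bool) : Prop := out = is_include_directive_py_alt line
instance (line : String) (out : Bool) : Decidable (Spec_is_include_directive_py line out) := by unfold Spec_is_include_directive_py; infer_instance

-- ===== CLAIM (what is proved, stated in full; the proofs are below) =====
def Claim_equal_is_include_directive_py : Prop := ∀ (line : String), Dom_is_include_directive_py line → Spec_is_include_directive_py line (is_include_directive_py line)

-- ===== LEMMAS AND PROOFS =====

-- pvHead l = p  iff  l is exactly p, or p followed by a space or '=' starts l (for delimiter-free p)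
theorem pvHead_eq_iff (p : List Char) (hp : ∀ c ∈ p, ¬ (c = ' ' ∨ c = '=')) (l : List Char) :
    pvHead l = p ↔ (l = p ∨ (p ++ [' ']) <+: l ∨ (p ++ ['=']) <+: l) := by
  induction p generalizing l with
  | nil =>
    cases l with
    | nil => simp [pvHead]
    | cons c cs =>
      simp only [pvHead, List.nil_append]
      by_cases hc : c = ' ' ∨ c = '='
      · rw [if_pos (by simpa using hc)]
        constructor
        · intro _
          rcases hc with h' | h'
          · exact Or.inr (Or.inl ⟨cs, by rw [h', List.singleton_append]⟩)
          · exact Or.inr (Or.inr ⟨cs, by rw [h', List.singleton_append]⟩)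
        · intro _; rfl
      · rw [if_neg (by simpa using hc)]
        constructor
        · intro h; simp at h
        · rintro (h | ⟨t, ht⟩ | ⟨t, ht⟩)
          · simp at h
          · rw [List.singleton_append] at ht
            injection ht with h1 _
            exact absurd (Or.inl h1.symm) hc
          · rw [List.singleton_append] at ht
            injection ht with h1 _
            exact absurd (Or.inr h1.symm) hc
  | cons a p ih =>
    have ha : ¬ (a = ' ' ∨ a = '=') := hp a List.mem_cons_self
    have hp' : ∀ c ∈ p, ¬ (c = ' ' ∨ c = '=') := fun c hc => hp c (List.mem_cons_of_mem _ hc)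
    cases l with
    | nil => simp [pvHead]
    | cons c cs =>
      simp only [pvHead]
      by_cases hc : c = ' ' ∨ c = '='
      · rw [if_pos (by simpa using hc)]
        have hne : c ≠ a := fun he => ha (he ▸ hc)
        constructor
        · intro h; simp at h
        · rintro (h | h | h)
          · injection h with h1 _; exact absurd h1 hne
          · rw [List.cons_append, List.cons_prefix_cons] at h
            exact absurd h.1.symm hne
          · rw [List.cons_append, List.cons_prefix_cons] at h
            exact absurd h.1.symm hne
      · rw [if_neg (by simpa using hc)]
        constructor
        · intro h
          injection h with h1 h2
          subst h1
          rcases (ih hp' cs).mp h2 with h' | h' | h'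
          · exact Or.inl (by rw [h'])
          · exact Or.inr (Or.inl (by rw [List.cons_append]; exact List.cons_prefix_cons.mpr ⟨rfl, h'⟩))
          · exact Or.inr (Or.inr (by rw [List.cons_append]; exact List.cons_prefix_cons.mpr ⟨rfl, h'⟩))
        · rintro (h | h | h)
          · injection h with h1 h2
            subst h1
            rw [(ih hp' cs).mpr (Or.inl h2)]
          · rw [List.cons_append, List.cons_prefix_cons] at h
            obtain ⟨h1, h2⟩ := h
            subst h1
            rw [(ih hp' cs).mpr (Or.inr (Or.inl h2))]
          · rw [List.cons_append, List.cons_prefix_cons] at h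
            obtain ⟨h1, h2⟩ := h
            subst h1
            rw [(ih hp' cs).mpr (Or.inr (Or.inr h2))]

-- one prefix of A's loop body agrees with B's head test against that prefix
theorem per_prefix (p : String) (hp : ∀ c ∈ p.toList, ¬ (c = ' ' ∨ c = '=')) (l : String) :
    ((l == p) || PySem.Str.startswith l (p ++ " ") || PySem.Str.startswith l (p ++ "="))
      = (String.ofList (pvHead l.toList) == p) := by
  have key := pvHead_eq_iff p.toList hp l.toList
  have happ1 : (p ++ " ").toList = p.toList ++ [' '] := by simp
  have happ2 : (p ++ "=").toList = p.toList ++ ['='] := by simp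
  have hmk : (String.ofList (pvHead l.toList) == p) = decide (pvHead l.toList = p.toList) := by
    by_cases h : pvHead l.toList = p.toList
    · rw [h]
      simp
    · rw [decide_eq_false h]
      refine beq_eq_false_iff_ne.mpr fun he => h ?_
      rw [← he]; simp
  rw [hmk]
  by_cases h : pvHead l.toList = p.toList
  · rw [decide_eq_true h]
    rcases key.mp h with h' | h' | h'
    · have hl : l = p := by
        have : String.ofList l.toList = String.ofList p.toList := by rw [h']
        simpa using this
      rw [hl]
      simp
    · have hs : PySem.Str.startswith l (p ++ " ") = true := by
        rw [PySem.Str.startswith_eq, happ1]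
        exact (PySem.Chars.startswith_iff _ _).mpr h'
      rw [hs]
      simp
    · have hs : PySem.Str.startswith l (p ++ "=") = true := by
        rw [PySem.Str.startswith_eq, happ2]
        exact (PySem.Chars.startswith_iff _ _).mpr h'
      rw [hs]
      simp
  · rw [decide_eq_false h]
    have h1 : (l == p) = false := by
      refine beq_eq_false_iff_ne.mpr fun he => h ?_
      exact key.mpr (Or.inl (by rw [he]))
    have h2 : PySem.Str.startswith l (p ++ " ") = false := by
      refine Bool.eq_false_iff.mpr fun hs => h ?_
      rw [PySem.Str.startswith_eq, happ1] at hs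
      exact key.mpr (Or.inr (Or.inl ((PySem.Chars.startswith_iff _ _).mp hs)))
    have h3 : PySem.Str.startswith l (p ++ "=") = false := by
      refine Bool.eq_false_iff.mpr fun hs => h ?_
      rw [PySem.Str.startswith_eq, happ2] at hs
      exact key.mpr (Or.inr (Or.inr ((PySem.Chars.startswith_iff _ _).mp hs)))
    rw [h1, h2, h3]
    rfl

-- ===== VERDICT (by name: the statement is the Claim_ definition above) =====
set_option maxRecDepth 4096 in
theorem is_include_directive_py_spec : Claim_equal_is_include_directive_py := by
  intro line _
  unfold Spec_is_include_directive_py is_include_directive_py is_include_directive_py_alt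
  set l := PySem.Str.lower line with hl
  have e1 : ("-r" : String).toList = ['-', 'r'] := by simp
  have e2 : ("--requirement" : String).toList =
      ['-', '-', 'r', 'e', 'q', 'u', 'i', 'r', 'e', 'm', 'e', 'n', 't'] := by simp
  have e3 : ("-c" : String).toList = ['-', 'c'] := by simp
  have e4 : ("--constraint" : String).toList =
      ['-', '-', 'c', 'o', 'n', 's', 't', 'r', 'a', 'i', 'n', 't'] := by simp
  simp only [allowedIncludePrefixes, List.any_cons, List.any_nil, List.contains_cons,
    List.contains_nil]
  rw [per_prefix "-r" (by rw [e1]; simp) l,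
    per_prefix "--requirement" (by rw [e2]; simp) l,
    per_prefix "-c" (by rw [e3]; simp) l,
    per_prefix "--constraint" (by rw [e4]; simp) l]
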